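-- pv_equiv track=rewrite | github.com/hniemeyer/green_programming | cpp_on_sea/adler32/python/adler32.py | adler32
-- ===== SOURCE A (Python) =====
-- def adler32(data):
--     mod_adler = 65521
--     a = 1
--     b = 0
--
--     for byte in data:
--         a = (a + byte) % mod_adler
--         b = (b + a) % mod_adler
--
--     return (b << 16) | a
-- ===== SOURCE B (Python) =====
-- def adler32(data):
--     mod_adler = 65521
--     data = list(data)
--     n = len(data)
--     a = (1 + sum(data)) % mod_adler
--     b = (n + sum((n - i) * x for i, x in enumerate(data))) % mod_adler
--     return (b << 16) | a
-- ===== Notes on version B (the rewrite author's own statement) =====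
-- stated objective: alternative
-- what changed: Replaces A's per-byte running (a,b) recurrence with two closed-form computations: a = (1+sum(data)) % 65521 and b = (n + sum((n-i)*x)) % 65521 from one plain sum and one enumerate-weighted sum.
import Mathlib
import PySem

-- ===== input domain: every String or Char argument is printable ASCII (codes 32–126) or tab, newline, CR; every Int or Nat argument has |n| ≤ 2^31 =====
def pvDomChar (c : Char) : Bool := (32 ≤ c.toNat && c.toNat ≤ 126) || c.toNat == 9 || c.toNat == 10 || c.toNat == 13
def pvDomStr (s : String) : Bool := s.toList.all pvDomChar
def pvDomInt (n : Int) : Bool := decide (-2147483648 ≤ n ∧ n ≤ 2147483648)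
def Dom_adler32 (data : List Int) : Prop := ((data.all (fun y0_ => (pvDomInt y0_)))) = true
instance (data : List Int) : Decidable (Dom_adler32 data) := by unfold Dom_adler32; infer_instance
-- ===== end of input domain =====

-- B replaces A's per-byte running (a, b) recurrence by two closed-form sums
-- (a from sum(data), b from a weighted sum via enumerate); objective: alternative decomposition.

-- ===== PORT A =====
-- the loop body of A: a = (a + byte) % 65521; b = (b + a) % 65521
def adler32Step (st : Int × Int) (byte : Int) : Int × Int :=
  let a := PySem.Int.mod (st.1 + byte) 65521
  let b := PySem.Int.mod (st.2 + a) 65521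
  (a, b)

def adler32 (data : List Int) : Int :=
  let ab := data.foldl adler32Step (1, 0)
  PySem.Int.bor (ab.2 <<< 16) ab.1

-- ===== PORT B =====
def adler32_alt (data : List Int) : Int :=
  let n : Int := data.length
  let a := PySem.Int.mod (1 + data.sum) 65521
  let b := PySem.Int.mod
    (n + ((PySem.List.enumerate data).map (fun p => (n - p.1) * p.2)).sum) 65521
  PySem.Int.bor (b <<< 16) a

-- ===== PRECONDITION & SPEC =====
def Spec_adler32 (data : List Int) (out : Int) : Prop := out = adler32_alt data
instance (data : List Int) (out : Int) : Decidable (Spec_adler32 data out) := by unfold Spec_adler32; infer_instance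

-- ===== CLAIM (what is proved, stated in full; the proofs are below) =====
def Claim_equal_adler32 : Prop := ∀ (data : List Int), Dom_adler32 data → Spec_adler32 data (adler32 data)

-- ===== LEMMAS AND PROOFS =====

theorem pymod_eq (x : Int) : PySem.Int.mod x 65521 = x % 65521 :=
  PySem.Int.mod_eq_emod_of_pos (by norm_num)

-- recursive form of the weighted sum: byte at position i of xs gets weight (xs.length - i)
def wsum : List Int → Int
  | [] => 0
  | x :: xs => ((xs.length : Int) + 1) * x + wsum xs

theorem enum_wsum (xs : List Int) : ∀ (c s : Int), c - s = xs.length →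
    ((PySem.List.enumerate xs s).map (fun p => (c - p.1) * p.2)).sum = wsum xs := by
  induction xs with
  | nil => intro c s _; simp [PySem.List.enumerate_nil, wsum]
  | cons x t ih =>
    intro c s h
    simp only [PySem.List.enumerate_cons, List.map_cons, List.sum_cons, wsum]
    rw [ih c (s + 1) (by simp only [List.length_cons] at h; push_cast at h ⊢; omega)]
    have : c - s = (t.length : Int) + 1 := by simp only [List.length_cons] at h; push_cast at h ⊢; omega
    rw [this]

theorem drop_emod (x : Int) : Int.ModEq 65521 (x % 65521) x :=
  Int.emod_emod_of_dvd x dvd_rfl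

theorem fold_closed (xs : List Int) : ∀ (a b : Int), xs ≠ [] →
    xs.foldl adler32Step (a, b) =
      ((a + xs.sum) % 65521, (b + (xs.length : Int) * a + wsum xs) % 65521) := by
  induction xs with
  | nil => intro a b h; exact absurd rfl h
  | cons x t ih =>
    intro a b _
    rw [List.foldl_cons]
    have hstep : adler32Step (a, b) x =
        ((a + x) % 65521, (b + (a + x) % 65521) % 65521) := by
      simp [adler32Step]
    rw [hstep]
    rcases eq_or_ne t [] with ht | ht
    · subst ht
      simp only [List.foldl_nil, List.sum_cons, List.sum_nil, List.length_cons,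
        List.length_nil, wsum]
      simp only [Prod.mk.injEq]
      refine ⟨by omega, ?_⟩
      push_cast
      -- (b + (a+x)%m)%m = (b + a + x)%m : linear with constant modulus
      omega
    · rw [ih _ _ ht]
      refine Prod.ext ?_ ?_
      · simp only [List.sum_cons]; omega
      · -- b-component: a ModEq chain, then ring
        show ((b + (a + x) % 65521) % 65521 + (t.length : Int) * ((a + x) % 65521) + wsum t) % 65521
            = (b + ((x :: t).length : Int) * a + wsum (x :: t)) % 65521
        have h1 : Int.ModEq 65521 ((b + (a + x) % 65521) % 65521) (b + (a + x)) :=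
          (drop_emod _).trans ((drop_emod (a + x)).add_left b)
        have h2 : Int.ModEq 65521 ((t.length : Int) * ((a + x) % 65521)) ((t.length : Int) * (a + x)) :=
          (drop_emod (a + x)).mul_left _
        have h3 : Int.ModEq 65521
            ((b + (a + x) % 65521) % 65521 + (t.length : Int) * ((a + x) % 65521) + wsum t)
            (b + (a + x) + (t.length : Int) * (a + x) + wsum t) :=
          (h1.add h2).add_right _
        have h4 : b + (a + x) + (t.length : Int) * (a + x) + wsum t
            = b + ((x :: t).length : Int) * a + wsum (x :: t) := by
          simp only [List.length_cons, wsum]; push_cast; ring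
        exact h3.trans (by rw [h4])

-- ===== VERDICT (by name: the statement is the Claim_ definition above) =====
theorem adler32_spec : Claim_equal_adler32 := by
  intro data _
  unfold Spec_adler32
  dsimp only [adler32, adler32_alt]
  rcases eq_or_ne data [] with h | h
  · subst h; decide
  · rw [fold_closed data 1 0 h,
        enum_wsum data (data.length : Int) 0 (by simp)]
    simp only [pymod_eq]
    have hb : (0:Int) + (data.length : Int) * 1 + wsum data
        = (data.length : Int) + wsum data := by ring
    rw [hb]
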